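-- pv_equiv track=rewrite | github.com/Tishleric/Para-Phrase-Generator-for-TG | src/utils.py | extract_all_caps_sequences
-- ===== SOURCE A (Python) =====
-- from typing import Dict, List, Any, Optional, Union, Tuple
--
-- def extract_all_caps_sequences(text: str) -> List[str]:
--     """
--     Extract sequences of all-caps words from text.
--
--     Args:
--         text (str): Text to process
--
--     Returns:
--         List[str]: List of all-caps sequences
--     """
--     if not text:
--         return []
--     words = text.split()
--     sequences = []
--     current_sequence = []
--     for word in words:
--         if word.isupper() and any(c.isalpha() for c in word):  # Must be all caps and have at least one letter
--             current_sequence.append(word)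
--         else:
--             if current_sequence:  # End of a sequence
--                 sequences.append(" ".join(current_sequence))
--                 current_sequence = []
--     if current_sequence:  # Add the last sequence if exists
--         sequences.append(" ".join(current_sequence))
--     return sequences
-- ===== SOURCE B (Python) =====
-- from typing import List
--
--
-- def extract_all_caps_sequences(text: str) -> List[str]:
--     """Boundary-index method: classify every word once, locate run starts and
--     run ends by comparing each flag with its neighbour, then cut the runs out
--     of the word list by slicing."""
--     words = text.split()
--     flags = [w.isupper() and any(c.isalpha() for c in w) for w in words]
--     starts = [i for i, (fl, prev) in enumerate(zip(flags, [False] + flags))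
--               if fl and not prev]
--     ends = [i + 1 for i, (fl, nxt) in enumerate(zip(flags, flags[1:] + [False]))
--             if fl and not nxt]
--     return [" ".join(words[s:e]) for s, e in zip(starts, ends)]
-- ===== Notes on version B (the rewrite author's own statement) =====
-- stated objective: alternative
-- what changed: Replaced A's single-pass accumulator-and-flush loop by a staged boundary-index method: classify every word once into a flag list, find run starts and run ends by comparing each flag with its neighbour, then cut each run out of the word list by slicing.
import Mathlib
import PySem

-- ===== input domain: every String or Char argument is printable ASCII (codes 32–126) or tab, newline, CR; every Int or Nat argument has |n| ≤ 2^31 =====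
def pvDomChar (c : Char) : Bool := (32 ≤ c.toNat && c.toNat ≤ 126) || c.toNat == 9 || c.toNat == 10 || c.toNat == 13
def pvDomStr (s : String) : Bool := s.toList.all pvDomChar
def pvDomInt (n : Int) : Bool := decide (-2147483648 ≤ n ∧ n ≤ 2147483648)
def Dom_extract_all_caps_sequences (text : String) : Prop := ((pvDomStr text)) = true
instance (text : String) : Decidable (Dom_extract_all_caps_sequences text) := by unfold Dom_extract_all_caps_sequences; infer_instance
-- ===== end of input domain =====

-- B replaces A's accumulator-and-flush loop by a staged boundary-index method:
-- classify each word once, locate run starts/ends by comparing neighbouring flags,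
-- then cut each run out of the word list by slicing; objective: alternative.

-- word.isupper() and any(c.isalpha() for c in word); on the ASCII domain the cased
-- characters are exactly the letters, so isupper = (some letter) ∧ (no lowercase letter).
def pvCaps (w : List Char) : Bool :=
  (w.any PySem.Chars.isalpha && w.all (fun c => !PySem.Chars.isalpha c || PySem.Chars.isupper c))
    && w.any PySem.Chars.isalpha

-- ===== PORT A =====
def extract_all_caps_sequences (text : String) : List String :=
  if text = "" then []
  else
    let words := PySem.Str.split₀ text
    let st := words.foldl
      (fun (st : List String × List String) word =>
        if pvCaps word.toList then (st.1, st.2 ++ [word])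
        else if st.2 ≠ [] then (st.1 ++ [PySem.Str.join " " st.2], []) else st)
      ([], [])
    if st.2 ≠ [] then st.1 ++ [PySem.Str.join " " st.2] else st.1

-- ===== PORT B =====
-- flags = per-word classification; starts = indices whose flag is set but the previous
-- flag is not; ends = i+1 where the flag is set but the next is not; zip and slice.
def extract_all_caps_sequences_alt (text : String) : List String :=
  let words := PySem.Str.split₀ text
  let flags := words.map (fun w => pvCaps w.toList)
  let starts := ((PySem.List.enumerate (flags.zip (false :: flags))).filter
      (fun p => p.2.1 && !p.2.2)).map (fun p => p.1)
  let ends := ((PySem.List.enumerate (flags.zip (PySem.List.slice flags (some 1) none ++ [false]))).filter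
      (fun p => p.2.1 && !p.2.2)).map (fun p => p.1 + 1)
  (starts.zip ends).map (fun se => PySem.Str.join " " (PySem.List.slice words (some se.1) (some se.2)))

-- ===== PRECONDITION & SPEC =====
def Spec_extract_all_caps_sequences (text : String) (out : List String) : Prop := out = extract_all_caps_sequences_alt text
instance (text : String) (out : List String) : Decidable (Spec_extract_all_caps_sequences text out) := by unfold Spec_extract_all_caps_sequences; infer_instance

-- ===== CLAIM (what is proved, stated in full; the proofs are below) =====
def Claim_equal_extract_all_caps_sequences : Prop := ∀ (text : String), Dom_extract_all_caps_sequences text → Spec_extract_all_caps_sequences text (extract_all_caps_sequences text)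

-- ===== LEMMAS AND PROOFS =====

-- A's loop body and finalization, named for the proofs (definitionally A's)
def pvStep (st : List String × List String) (word : String) : List String × List String :=
  if pvCaps word.toList then (st.1, st.2 ++ [word])
  else if st.2 ≠ [] then (st.1 ++ [PySem.Str.join " " st.2], []) else st

def pvFin (st : List String × List String) : List String :=
  if st.2 ≠ [] then st.1 ++ [PySem.Str.join " " st.2] else st.1

-- A's loop as structural recursion on (remaining words, current sequence).
def pvGoA : List String → List String → List String
  | [], cur => if cur ≠ [] then [PySem.Str.join " " cur] else []
  | w :: ws, cur =>
    if pvCaps w.toList then pvGoA ws (cur ++ [w])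
    else (if cur ≠ [] then [PySem.Str.join " " cur] else []) ++ pvGoA ws []

theorem pvFoldA (ws : List String) (acc cur : List String) :
    pvFin (ws.foldl pvStep (acc, cur)) = acc ++ pvGoA ws cur := by
  induction ws generalizing acc cur with
  | nil =>
    simp only [List.foldl_nil, pvFin, pvGoA]
    split_ifs <;> simp
  | cons w ws ih =>
    rw [List.foldl_cons]
    by_cases hc : pvCaps w.toList
    · rw [show pvStep (acc, cur) w = (acc, cur ++ [w]) from by simp [pvStep, hc]]
      rw [ih, pvGoA, if_pos hc]
    · by_cases h0 : cur = []
      · subst h0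
        rw [show pvStep (acc, ([] : List String)) w = (acc, []) from by simp [pvStep, hc]]
        rw [ih]
        simp [pvGoA, hc]
      · rw [show pvStep (acc, cur) w = (acc ++ [PySem.Str.join " " cur], []) from by
            simp [pvStep, hc, h0]]
        rw [ih]
        simp [pvGoA, hc, h0]

-- B's staged passes, recursively: flag of the first word, run starts, run ends.
def pvHd : List String → Bool
  | [] => false
  | w :: _ => pvCaps w.toList

def pvSt (prev : Bool) : List String → List Nat
  | [] => []
  | w :: ws => (if pvCaps w.toList && !prev then [0] else []) ++ (pvSt (pvCaps w.toList) ws).map (· + 1)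

def pvEn : List String → List Nat
  | [] => []
  | w :: ws => (if pvCaps w.toList && !(pvHd ws) then [1] else []) ++ (pvEn ws).map (· + 1)

-- B's output, after the index lists have been extracted
def pvZs (ws : List String) : List String :=
  ((pvSt false ws).zip (pvEn ws)).map
    (fun se => PySem.Str.join " " ((ws.drop se.1).take (se.2 - se.1)))

theorem pvStarts_bridge (ws : List String) (prev : Bool) (n : Int) :
    (((PySem.List.enumerate ((ws.map (fun w => pvCaps w.toList)).zip
        (prev :: ws.map (fun w => pvCaps w.toList))) n).filter
      (fun p => p.2.1 && !p.2.2)).map (fun p => p.1))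
    = (pvSt prev ws).map (fun k : Nat => n + (k : Int)) := by
  induction ws generalizing prev n with
  | nil => rfl
  | cons w ws ih =>
    simp only [List.map_cons, List.zip_cons_cons, PySem.List.enumerate_cons, List.filter_cons]
    rw [pvSt]
    by_cases hc : (pvCaps w.toList && !prev) = true
    · rw [if_pos hc, if_pos hc, List.map_cons, ih, List.map_append, List.map_map,
        List.map_cons, List.map_nil, List.singleton_append]
      congr 1
      · norm_num
      · exact List.map_congr_left (fun k _ => by
          simp only [Function.comp_apply]; push_cast; omega)
    · rw [if_neg hc, if_neg hc, ih, List.nil_append, List.map_map]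
      exact List.map_congr_left (fun k _ => by
        simp only [Function.comp_apply]; push_cast; omega)

theorem pvEnds_bridge (ws : List String) (n : Int) :
    (((PySem.List.enumerate ((ws.map (fun w => pvCaps w.toList)).zip
        ((ws.map (fun w => pvCaps w.toList)).tail ++ [false])) n).filter
      (fun p => p.2.1 && !p.2.2)).map (fun p => p.1 + 1))
    = (pvEn ws).map (fun k : Nat => n + (k : Int)) := by
  induction ws generalizing n with
  | nil => simp [pvEn]
  | cons w ws ih =>
    have hzip : ((w :: ws).map (fun w => pvCaps w.toList)).zip
        (((w :: ws).map (fun w => pvCaps w.toList)).tail ++ [false])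
        = (pvCaps w.toList, pvHd ws) ::
          ((ws.map (fun w => pvCaps w.toList)).zip
            ((ws.map (fun w => pvCaps w.toList)).tail ++ [false])) := by
      cases ws <;> simp [pvHd]
    rw [hzip, PySem.List.enumerate_cons, List.filter_cons, pvEn]
    by_cases hc : (pvCaps w.toList && !(pvHd ws)) = true
    · rw [if_pos hc, if_pos (by simpa using hc), List.map_cons, ih, List.map_append,
        List.map_map, List.map_cons, List.map_nil, List.singleton_append]
      congr 1
      all_goals try norm_num
      all_goals (intro a _; omega)
    · rw [if_neg hc, if_neg (by simpa using hc), ih, List.nil_append, List.map_map]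
      exact List.map_congr_left (fun k _ => by
        simp only [Function.comp_apply]; push_cast; omega)

-- B's port computes pvZs of the word list
theorem pvAlt_eq_pvZs (text : String) :
    extract_all_caps_sequences_alt text = pvZs (PySem.Str.split₀ text) := by
  unfold extract_all_caps_sequences_alt
  dsimp only
  rw [PySem.List.slice_from_one]
  rw [show ∀ (l : List Bool), false :: l = (false : Bool) :: l from fun _ => rfl]
  rw [pvStarts_bridge (PySem.Str.split₀ text) false 0]
  rw [pvEnds_bridge (PySem.Str.split₀ text) 0]
  simp only [zero_add]
  rw [List.zip_map, pvZs, List.map_map]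
  refine List.map_congr_left (fun se _ => ?_)
  obtain ⟨s, e⟩ := se
  simp [PySem.List.slice_natCast]

-- prev is irrelevant to pvSt when the first word is not all-caps
theorem pvSt_of_hd_false (ws : List String) (h : pvHd ws = false) :
    pvSt true ws = pvSt false ws := by
  cases ws with
  | nil => rfl
  | cons w t => simp [pvHd] at h; simp [pvSt, h]

-- peeling an all-caps run r (followed by a non-caps word or the end) off the index lists
theorem pvSt_run (r ws : List String) (hr : ∀ w ∈ r, pvCaps w.toList = true)
    (hw : pvHd ws = false) :
    pvSt true (r ++ ws) = (pvSt false ws).map (· + r.length) := by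
  induction r with
  | nil => simpa using pvSt_of_hd_false ws hw
  | cons w r ih =>
    have hcw := hr w (by simp)
    rw [List.cons_append, pvSt, hcw, ih (fun x hx => hr x (by simp [hx]))]
    simp only [Bool.not_true, Bool.and_false, if_neg (by simp : ¬((false : Bool) = true)),
      List.nil_append, List.map_map, List.length_cons]
    exact List.map_congr_left (fun k _ => by simp only [Function.comp_apply]; omega)

theorem pvEn_run (r ws : List String) (hr : ∀ w ∈ r, pvCaps w.toList = true)
    (hw : pvHd ws = false) :
    pvEn (r ++ ws) = (if r = [] then [] else [r.length]) ++ (pvEn ws).map (· + r.length) := by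
  induction r with
  | nil => simp
  | cons w r ih =>
    have hcw := hr w (by simp)
    rw [List.cons_append, pvEn, ih (fun x hx => hr x (by simp [hx]))]
    cases r with
    | nil => simp [hcw, hw]
    | cons w' r' =>
      have hh : pvHd ((w' :: r') ++ ws) = true := by simp [pvHd, hr w' (by simp)]
      simp only [hh, hcw, Bool.not_true, Bool.and_false,
        if_neg (by simp : ¬((false : Bool) = true)), List.nil_append,
        List.map_map, List.map_cons, List.length_cons, List.singleton_append,
        if_neg (by simp : ¬((w' :: r' : List String) = []))]
      congr 1

-- A's recursion flushes an entire all-caps run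
theorem pvGoA_caps (r : List String) (hr : ∀ w ∈ r, pvCaps w.toList = true) :
    ∀ (ws acc : List String), pvGoA (r ++ ws) acc = pvGoA ws (acc ++ r) := by
  induction r with
  | nil => simp
  | cons w r ih =>
    intro ws acc
    rw [List.cons_append, pvGoA, if_pos (hr w (by simp)),
      ih (fun x hx => hr x (by simp [hx]))]
    simp

theorem pvGoA_flush (ws cur : List String) (h : pvHd ws = false) (hc : cur ≠ []) :
    pvGoA ws cur = PySem.Str.join " " cur :: pvGoA ws [] := by
  cases ws with
  | nil => simp [pvGoA, hc]
  | cons w t =>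
    simp [pvHd] at h
    simp [pvGoA, h, hc]

-- main equivalence of the two strategies, by strong induction on the word count
theorem pvMain : ∀ (n : Nat) (ws : List String), ws.length ≤ n → pvZs ws = pvGoA ws [] := by
  intro n
  induction n with
  | zero =>
    intro ws h
    rw [List.length_eq_zero_iff.mp (Nat.le_zero.mp h)]
    rfl
  | succ n ih =>
    intro ws h
    match ws with
    | [] => rfl
    | w :: t =>
      by_cases hf : pvCaps w.toList = true
      · -- peel the maximal all-caps run r
        have hsplit : w :: t = (w :: t.takeWhile (fun w => pvCaps w.toList))
            ++ t.dropWhile (fun w => pvCaps w.toList) := by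
          rw [List.cons_append, List.takeWhile_append_dropWhile]
        set r := w :: t.takeWhile (fun w => pvCaps w.toList) with hrdef
        set ws' := t.dropWhile (fun w => pvCaps w.toList) with hwdef
        have hr : ∀ x ∈ r, pvCaps x.toList = true := by
          intro x hx
          rcases List.mem_cons.mp hx with h1 | h1
          · rw [h1]; exact hf
          · simpa using List.mem_takeWhile_imp h1
        have hhd : pvHd ws' = false := by
          have hthis := List.head?_dropWhile_not (fun w => pvCaps w.toList) t
          rw [← hwdef] at hthis
          cases hcase : ws' with
          | nil => rfl
          | cons a b => rw [hcase] at hthis; simpa [pvHd] using hthis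
        have hlen : ws'.length ≤ n := by
          have h1 : ws'.length ≤ t.length := List.length_dropWhile_le _ t
          have h2 : t.length ≤ n := by simpa using h
          omega
        -- left side: first run, then the shifted remainder
        have hSt : pvSt false (r ++ ws') = 0 :: (pvSt false ws').map (· + r.length) := by
          rw [hrdef, List.cons_append, pvSt, hf,
            pvSt_run _ _ (fun x hx => hr x (by simp [hrdef, hx])) hhd]
          simp [List.map_map, Function.comp_def]
          all_goals try omega
        have hEn : pvEn (r ++ ws') = r.length :: (pvEn ws').map (· + r.length) := by
          rw [pvEn_run r ws' hr hhd, if_neg (by simp [hrdef])]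
          rfl
        have hz : pvZs (r ++ ws')
            = PySem.Str.join " " r :: pvZs ws' := by
          rw [pvZs, hSt, hEn, List.zip_cons_cons, List.zip_map, List.map_cons, List.map_map]
          congr 1
          · simp
          · rw [pvZs]
            refine List.map_congr_left (fun se _ => ?_)
            obtain ⟨s, e⟩ := se
            simp only [Function.comp_def, Prod.map_apply]
            congr 2
            · omega
            · rw [show s + r.length = r.length + s by omega, List.drop_length_add_append]
        rw [hsplit, hz, ih ws' hlen]
        -- right side
        rw [pvGoA_caps r hr ws' [], List.nil_append,
          pvGoA_flush ws' r hhd (by simp [hrdef])]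
      · -- non-caps head word: both sides drop it
        have hz : pvZs (w :: t) = pvZs t := by
          have hf' : pvCaps w.toList = false := by simpa using hf
          rw [pvZs, pvZs, pvSt, pvEn, hf']
          simp only [Bool.false_and, Bool.false_eq_true, if_false, List.nil_append]
          rw [List.zip_map, List.map_map]
          refine List.map_congr_left (fun se _ => ?_)
          obtain ⟨s, e⟩ := se
          simp only [Function.comp_def, Prod.map_apply]
          congr 2
          all_goals try omega
        rw [hz, ih t (by simpa using h), pvGoA, if_neg (by simpa using hf)]
        simp

-- ===== VERDICT (by name: the statement is the Claim_ definition above) =====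
theorem extract_all_caps_sequences_spec : Claim_equal_extract_all_caps_sequences := by
  intro text _
  unfold Spec_extract_all_caps_sequences
  rw [pvAlt_eq_pvZs, pvMain (PySem.Str.split₀ text).length _ le_rfl]
  unfold extract_all_caps_sequences
  by_cases h : text = ""
  · subst h; decide
  · rw [if_neg h]
    show pvFin ((PySem.Str.split₀ text).foldl pvStep ([], [])) = pvGoA (PySem.Str.split₀ text) []
    rw [pvFoldA]
    simp
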